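-- pv_equiv track=rewrite | github.com/SaarShai/Primes-Equispaced | experiments/b_tail_close.py | mertens_sieve
-- ===== SOURCE A (Python) =====
-- def mertens_sieve(limit):
--     sp = [0] * (limit + 1)
--     for i in range(2, limit + 1):
--         if sp[i] == 0:
--             for j in range(i, limit + 1, i):
--                 if sp[j] == 0:
--                     sp[j] = i
--     mu = [0] * (limit + 1)
--     mu[1] = 1
--     for n in range(2, limit + 1):
--         p = sp[n]
--         if (n // p) % p == 0:
--             mu[n] = 0
--         else:
--             mu[n] = -mu[n // p]
--     M = [0] * (limit + 1)
--     s = 0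
--     for n in range(1, limit + 1):
--         s += mu[n]
--         M[n] = s
--     return mu, M
-- ===== SOURCE B (Python) =====
-- def _smallest_factor(n):
--     d = 2
--     while d * d <= n and n % d != 0:
--         d += 1
--     return d if n % d == 0 else n
--
--
-- def mertens_sieve(limit):
--     mu = [0, 1]
--     for n in range(2, limit + 1):
--         p = _smallest_factor(n)
--         q = n // p
--         mu.append(0 if q % p == 0 else -mu[q])
--     M = [0]
--     s = 0
--     for v in mu[1:]:
--         s += v
--         M.append(s)
--     return mu, M
-- ===== Notes on version B (the rewrite author's own statement) =====
-- stated objective: alternative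
-- what changed: Replaces A's smallest-prime-factor sieve table with per-number trial division (no sp array at all) and builds mu and M by appending to growing lists instead of preallocating and index-assigning.
import Mathlib
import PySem

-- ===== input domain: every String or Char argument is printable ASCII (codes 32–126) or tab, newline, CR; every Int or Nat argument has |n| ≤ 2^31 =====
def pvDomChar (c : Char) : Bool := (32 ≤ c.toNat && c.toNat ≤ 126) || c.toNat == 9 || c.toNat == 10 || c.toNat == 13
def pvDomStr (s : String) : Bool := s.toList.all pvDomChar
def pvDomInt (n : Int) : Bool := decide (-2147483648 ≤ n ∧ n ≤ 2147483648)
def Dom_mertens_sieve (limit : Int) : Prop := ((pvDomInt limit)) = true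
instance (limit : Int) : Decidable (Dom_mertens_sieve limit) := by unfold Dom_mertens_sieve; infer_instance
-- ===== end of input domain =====

-- B replaces A's smallest-prime-factor sieve table with per-number trial division and
-- builds mu and M by appending to growing lists instead of preallocating + index assignment
-- (alternative structure, not faster); return values agree for every limit ≥ 1 (A raises
-- IndexError for limit ≤ 0, excluded by Pre_).

-- ===== PORT A =====
-- A-side helpers: the sp sieve (the two nested loops filling sp), step for step
def pvASieveInner (limit i : Int) (sp : List Int) : List Int :=
  (PySem.List.pyRange i (limit + 1) i).foldl (fun sp j =>
    if PySem.List.pyGetD sp j 0 == 0 then sp.set j.toNat i else sp) sp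

def pvASieve (limit : Int) : List Int :=
  (PySem.List.pyRange 2 (limit + 1) 1).foldl (fun sp i =>
    if PySem.List.pyGetD sp i 0 == 0 then pvASieveInner limit i sp else sp)
    (List.replicate (limit + 1).toNat 0)

def mertens_sieve (limit : Int) : List Int × List Int :=
  let sp := pvASieve limit
  let mu : List Int :=
    (PySem.List.pyRange 2 (limit + 1) 1).foldl (fun mu n =>
      let p := PySem.List.pyGetD sp n 0
      if PySem.Int.mod (PySem.Int.floordiv n p) p == 0 then
        mu.set n.toNat 0
      else
        mu.set n.toNat (-(PySem.List.pyGetD mu (PySem.Int.floordiv n p) 0)))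
      ((List.replicate (limit + 1).toNat 0).set 1 1)
  let MS : List Int × Int :=
    (PySem.List.pyRange 1 (limit + 1) 1).foldl (fun acc n =>
      let s := acc.2 + PySem.List.pyGetD mu n 0
      (acc.1.set n.toNat s, s)) (List.replicate (limit + 1).toNat 0, 0)
  (mu, MS.1)

-- ===== PORT B =====
-- B-side helper: Python's `while d*d <= n and n % d != 0: d += 1`; exact on the Nat
-- inputs it is called with (the loop variable n of B is ≥ 2, hence a Nat)
def trialLoop (n d : Nat) : Nat :=
  if h : d * d ≤ n ∧ n % d ≠ 0 then trialLoop n (d + 1) else d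
termination_by n + 1 - d
decreasing_by
  obtain ⟨h1, _⟩ := h
  have hd : d ≤ n := by
    rcases Nat.eq_zero_or_pos d with h0 | h0
    · omega
    · exact le_trans (Nat.le_mul_of_pos_left d h0) h1
  omega

def smallestFactor (n : Nat) : Nat :=
  let d := trialLoop n 2
  if n % d == 0 then d else n

def mertens_sieve_alt (limit : Int) : List Int × List Int :=
  let mu : List Int :=
    (PySem.List.pyRange 2 (limit + 1) 1).foldl (fun mu n =>
      let p : Int := (smallestFactor n.toNat : Nat)
      let q := PySem.Int.floordiv n p
      mu ++ [if PySem.Int.mod q p == 0 then 0 else -(PySem.List.pyGetD mu q 0)]) [0, 1]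
  let MS : List Int × Int :=
    (PySem.List.slice mu (some 1) none).foldl (fun acc v =>
      (acc.1 ++ [acc.2 + v], acc.2 + v)) ([0], 0)
  (mu, MS.1)

-- ===== PRECONDITION & SPEC =====
-- A writes mu[1] = 1 into a list of length limit+1, so it raises IndexError for limit ≤ 0.
def Pre_mertens_sieve (limit : Int) : Prop := 1 ≤ limit
instance (limit : Int) : Decidable (Pre_mertens_sieve limit) := by
  unfold Pre_mertens_sieve; infer_instance
def pvWitness_mertens_sieve : Int := (5)

def Spec_mertens_sieve (limit : Int) (out : List Int × List Int) : Prop := out = mertens_sieve_alt limit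
instance (limit : Int) (out : List Int × List Int) : Decidable (Spec_mertens_sieve limit out) := by unfold Spec_mertens_sieve; infer_instance

-- ===== CLAIM (what is proved, stated in full; the proofs are below) =====
def Claim_equal_mertens_sieve : Prop := ∀ (limit : Int), Dom_mertens_sieve limit → Pre_mertens_sieve limit → Spec_mertens_sieve limit (mertens_sieve limit)

-- ===== LEMMAS AND PROOFS =====

lemma trialLoop_spec (n : Nat) (_hn : 2 ≤ n) :
    ∀ d : Nat, 2 ≤ d → d ≤ n.minFac →
      (n % trialLoop n d = 0 ∧ trialLoop n d = n.minFac) ∨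
      (n % trialLoop n d ≠ 0 ∧ n < trialLoop n d * trialLoop n d ∧ trialLoop n d ≤ n.minFac) := by
  have hmf : n % n.minFac = 0 := Nat.dvd_iff_mod_eq_zero.mp (Nat.minFac_dvd n)
  have main : ∀ m d, 2 ≤ d → d ≤ n.minFac → n.minFac - d ≤ m →
      (n % trialLoop n d = 0 ∧ trialLoop n d = n.minFac) ∨
      (n % trialLoop n d ≠ 0 ∧ n < trialLoop n d * trialLoop n d ∧ trialLoop n d ≤ n.minFac) := by
    intro m
    induction m with
    | zero =>
      intro d h2 hle hm
      have hd : d = n.minFac := by omega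
      rw [trialLoop]
      have : ¬ (d * d ≤ n ∧ n % d ≠ 0) := by rw [hd]; simp [hmf]
      rw [dif_neg this]
      left; exact ⟨by rw [hd]; exact hmf, hd⟩
    | succ m ih =>
      intro d h2 hle hm
      by_cases h : d * d ≤ n ∧ n % d ≠ 0
      · rw [trialLoop, dif_pos h]
        have hne : d ≠ n.minFac := fun he => h.2 (he ▸ hmf)
        exact ih (d + 1) (by omega) (by omega) (by omega)
      · rw [trialLoop, dif_neg h]
        by_cases hmod : n % d = 0
        · left
          refine ⟨hmod, le_antisymm hle ?_⟩
          exact Nat.minFac_le_of_dvd h2 (Nat.dvd_of_mod_eq_zero hmod)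
        · right
          exact ⟨hmod, by omega, hle⟩
  intro d h2 hle
  exact main (n.minFac - d) d h2 hle le_rfl

lemma smallestFactor_eq_minFac (n : Nat) (_hn : 2 ≤ n) : smallestFactor n = n.minFac := by
  have h2 : 2 ≤ n.minFac := (Nat.minFac_prime (by omega)).two_le
  rcases trialLoop_spec n _hn 2 le_rfl h2 with ⟨hmod, heq⟩ | ⟨hmod, hlt, hle⟩
  · have hmf : n % n.minFac = 0 := Nat.dvd_iff_mod_eq_zero.mp (Nat.minFac_dvd n)
    simp [smallestFactor, heq, hmf]
  · have hnp : Nat.Prime n := by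
      by_contra hnp
      have := Nat.minFac_sq_le_self (by omega) hnp
      nlinarith [this, Nat.pow_two n.minFac]
    simp only [smallestFactor]
    rw [if_neg (by simpa using hmod)]
    exact (Nat.Prime.minFac_eq hnp).symm

lemma setIfZero_length (i : Int) (js : List Int) : ∀ (sp : List Int),
    (js.foldl (fun sp j =>
      if PySem.List.pyGetD sp j 0 == 0 then sp.set j.toNat i else sp) sp).length = sp.length := by
  induction js with
  | nil => intro sp; rfl
  | cons j js ih =>
    intro sp
    simp only [List.foldl_cons]
    rw [ih]
    split <;> simp

lemma setIfZero_getD (i : Int) (js : List Int) : ∀ (sp : List Int),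
    js.Nodup → (∀ j ∈ js, 0 ≤ j ∧ j.toNat < sp.length) → ∀ (q : Nat),
    ((js.foldl (fun sp j =>
      if PySem.List.pyGetD sp j 0 == 0 then sp.set j.toNat i else sp) sp).getD q 0)
    = if (q : Int) ∈ js ∧ sp.getD q 0 = 0 then i else sp.getD q 0 := by
  induction js with
  | nil => intro sp _ _ q; simp
  | cons j js ih =>
    intro sp hnd hj q
    obtain ⟨hj0, hjlen⟩ := hj j (by simp)
    have hnd' : js.Nodup := (List.nodup_cons.mp hnd).2
    have hjmem : j ∉ js := (List.nodup_cons.mp hnd).1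
    simp only [List.foldl_cons]
    have hget : PySem.List.pyGetD sp j 0 = sp.getD j.toNat 0 :=
      PySem.List.pyGetD_of_nonneg sp 0 hj0
    set sp' := if PySem.List.pyGetD sp j 0 == 0 then sp.set j.toNat i else sp with hsp'
    have hlen' : sp'.length = sp.length := by rw [hsp']; split <;> simp
    have hne : ∀ r : Nat, (r : Int) ≠ j → sp'.getD r 0 = sp.getD r 0 := by
      intro r hr
      have hrj : j.toNat ≠ r := fun he => hr (by omega)
      rw [hsp']
      split
      · rcases Nat.lt_or_ge r sp.length with hlt | hge
        · rw [List.getD_eq_getElem _ _ (by simpa using hlt),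
              List.getD_eq_getElem _ _ hlt]
          exact List.getElem_set_ne hrj _
        · rw [List.getD_eq_default _ _ (by simpa using hge), List.getD_eq_default _ _ hge]
      · rfl
    rw [ih sp' hnd' (by intro x hx; rw [hlen']; exact hj x (by simp [hx])) q]
    by_cases hqj : (q : Int) = j
    · have hq : q = j.toNat := by omega
      have hqmem : (q : Int) ∉ js := by rw [hqj]; exact hjmem
      simp only [hqmem, false_and, if_false]
      by_cases hz : sp.getD j.toNat 0 = 0
      · have : sp' = sp.set j.toNat i := by rw [hsp', hget, if_pos (by simpa using hz)]
        rw [this, hq, List.getD_eq_getElem _ _ (by simpa using hjlen)]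
        rw [List.getElem_set_self]
        rw [if_pos ⟨by rw [show ((j.toNat : Int)) = j from by omega]; exact List.mem_cons_self, hz⟩]
      · have : sp' = sp := by rw [hsp', hget, if_neg (by simpa using hz)]
        rw [this, if_neg (by rw [hq]; tauto)]
    · rw [hne q hqj]
      have : ((q : Int) ∈ j :: js) ↔ ((q : Int) ∈ js) := by simp [hqj]
      simp only [this]

-- the value the sieve leaves at index q after all primes ≤ m have been processed
def spfVal (m q : Nat) : Int := if 2 ≤ q ∧ q.minFac ≤ m then (q.minFac : Int) else 0

lemma minFac_two_le {q : Nat} (h : 2 ≤ q) : 2 ≤ q.minFac :=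
  (Nat.minFac_prime (by omega)).two_le

lemma pvASieve_getD (limit : Int) (hl : 1 ≤ limit) (q : Nat) (hq : q ≤ limit.toNat) :
    (pvASieve limit).getD q 0 = spfVal limit.toNat q := by
  have hL1 : (limit + 1).toNat = limit.toNat + 1 := by omega
  have main : ∀ k : Nat, (k : Int) ≤ limit - 1 →
      ((PySem.List.pyRange 2 (2 + (k : Int)) 1).foldl (fun sp i =>
        if PySem.List.pyGetD sp i 0 == 0 then pvASieveInner limit i sp else sp)
        (List.replicate (limit + 1).toNat 0)).length = limit.toNat + 1 ∧
      ∀ r : Nat, r ≤ limit.toNat →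
      ((PySem.List.pyRange 2 (2 + (k : Int)) 1).foldl (fun sp i =>
        if PySem.List.pyGetD sp i 0 == 0 then pvASieveInner limit i sp else sp)
        (List.replicate (limit + 1).toNat 0)).getD r 0 = spfVal (1 + k) r := by
    intro k
    induction k with
    | zero =>
      intro _
      rw [show (2 + ((0 : Nat) : Int)) = 2 by norm_num, PySem.List.pyRange_one_eq_nil le_rfl]
      refine ⟨by simp [hL1], ?_⟩
      intro r hr
      rw [List.foldl_nil, List.getD_replicate 0 (by omega)]
      unfold spfVal
      rw [if_neg]
      rintro ⟨h2, hmf⟩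
      have := minFac_two_le h2
      omega
    | succ k ih =>
      intro hk
      obtain ⟨ihlen, ihget⟩ := ih (by push_cast at hk ⊢; omega)
      have hsplit : PySem.List.pyRange 2 (2 + ((k + 1 : Nat) : Int)) 1
          = PySem.List.pyRange 2 (2 + (k : Int)) 1 ++ [2 + (k : Int)] := by
        rw [show (2 + ((k + 1 : Nat) : Int)) = (2 + (k : Int)) + 1 by push_cast; ring]
        exact PySem.List.pyRange_one_succ_right (by omega)
      rw [hsplit, List.foldl_append, List.foldl_cons, List.foldl_nil]
      set sp := (PySem.List.pyRange 2 (2 + (k : Int)) 1).foldl (fun sp i =>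
        if PySem.List.pyGetD sp i 0 == 0 then pvASieveInner limit i sp else sp)
        (List.replicate (limit + 1).toNat 0) with hspdef
      set i : Int := 2 + (k : Int) with hidef
      have hiN : i.toNat = 2 + k := by omega
      have hiL : 2 + k ≤ limit.toNat := by omega
      have hgeti : PySem.List.pyGetD sp i 0 = spfVal (1 + k) (2 + k) := by
        rw [PySem.List.pyGetD_of_nonneg sp 0 (by omega), hiN]
        exact ihget (2 + k) hiL
      by_cases hp : (2 + k).minFac ≤ 1 + k
      · -- i is composite: sp[i] ≠ 0, no change
        have hval : spfVal (1 + k) (2 + k) = ((2 + k).minFac : Int) := by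
          unfold spfVal; rw [if_pos ⟨by omega, hp⟩]
        have hne : ¬ (PySem.List.pyGetD sp i 0 == 0) = true := by
          rw [hgeti, hval]
          have := minFac_two_le (show 2 ≤ 2 + k by omega)
          simp only [beq_iff_eq]
          intro h
          omega
        rw [if_neg hne]
        refine ⟨ihlen, ?_⟩
        intro r hr
        rw [ihget r hr]
        -- spfVal (1+k) r = spfVal (2+k) r since 2+k is not prime
        have hnotprime : ¬ (2 + k).minFac = 2 + k := by omega
        unfold spfVal
        by_cases h2r : 2 ≤ r
        · have hrp : r.minFac ≠ 2 + k := by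
            intro he
            have hprime : Nat.Prime (r.minFac) := Nat.minFac_prime (by omega)
            rw [he] at hprime
            exact hnotprime (Nat.prime_def_minFac.mp hprime).2
          by_cases hc : r.minFac ≤ 1 + k
          · rw [if_pos ⟨h2r, hc⟩, if_pos ⟨h2r, by omega⟩]
          · rw [if_neg (by tauto), if_neg (by rintro ⟨_, hc2⟩; omega)]
        · rw [if_neg (by tauto), if_neg (by tauto)]
      · -- i is prime: sp[i] = 0, inner loop runs
        have hile : (2 + k).minFac ≤ 2 + k := Nat.minFac_le (by omega)
        have hmfi : (2 + k).minFac = 2 + k := by omega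
        have hzero : spfVal (1 + k) (2 + k) = 0 := by
          unfold spfVal; rw [if_neg (by rintro ⟨_, h⟩; omega)]
        rw [if_pos (by rw [hgeti, hzero]; rfl)]
        unfold pvASieveInner
        have hipos : (0 : Int) < i := by omega
        have hnd : (PySem.List.pyRange i (limit + 1) i).Nodup := by
          rw [PySem.List.pyRange_of_pos _ _ hipos]
          refine List.Nodup.map ?_ List.nodup_range
          intro a b hab
          have h2 : (a : Int) = b := mul_left_cancel₀ (by omega : i ≠ 0) (by linarith)
          exact_mod_cast h2
        have hjbound : ∀ j ∈ PySem.List.pyRange i (limit + 1) i, 0 ≤ j ∧ j.toNat < sp.length := by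
          intro j hj
          rw [PySem.List.mem_pyRange_iff_of_pos hipos] at hj
          constructor
          · omega
          · rw [ihlen]; omega
        refine ⟨by rw [setIfZero_length, ihlen], ?_⟩
        intro r hr
        have hnorm : 1 + (k + 1) = 2 + k := by omega
        rw [hnorm]
        rw [setIfZero_getD i _ sp hnd hjbound r, ihget r hr]
        have hmem : ((r : Int) ∈ PySem.List.pyRange i (limit + 1) i)
            ↔ (2 + k ≤ r ∧ r ≤ limit.toNat ∧ (2 + k) ∣ r) := by
          rw [PySem.List.mem_pyRange_iff_of_pos hipos]
          constructor
          · rintro ⟨h1, h2, h3⟩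
            have hd : i ∣ (r : Int) := by
              have := dvd_add h3 (dvd_refl i)
              simpa using this
            have hd' : (2 + k) ∣ r := by
              have he : ((2 + k : Nat) : Int) = i := by push_cast; ring
              have h5 : ((2 + k : Nat) : Int) ∣ (r : Int) := by rw [he]; exact hd
              exact_mod_cast h5
            exact ⟨by omega, by omega, hd'⟩
          · rintro ⟨h1, h2, h3⟩
            have hd : i ∣ (r : Int) := by
              have h5 : ((2 + k : Nat) : Int) ∣ ((r : Nat) : Int) := Int.natCast_dvd_natCast.mpr h3
              have he : ((2 + k : Nat) : Int) = i := by push_cast; ring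
              rw [← he]; exact h5
            exact ⟨by omega, by omega, dvd_sub hd (dvd_refl i)⟩
        by_cases h2r : 2 ≤ r
        · have hmf2 : 2 ≤ r.minFac := minFac_two_le h2r
          have hrle : r.minFac ≤ r := Nat.minFac_le (by omega)
          by_cases heq : r.minFac = 2 + k
          · have hcond : (r : Int) ∈ PySem.List.pyRange i (limit + 1) i ∧ spfVal (1 + k) r = 0 := by
              refine ⟨hmem.mpr ⟨Nat.le_of_dvd (by omega) (heq ▸ Nat.minFac_dvd r), hr,
                heq ▸ Nat.minFac_dvd r⟩, ?_⟩
              unfold spfVal; rw [if_neg]; rintro ⟨_, hc⟩; omega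
            rw [if_pos hcond]
            unfold spfVal
            rw [if_pos ⟨h2r, by omega⟩]
            have : ((r.minFac : Nat) : Int) = i := by rw [heq]; push_cast; ring
            rw [this]
          · have hcond : ¬ ((r : Int) ∈ PySem.List.pyRange i (limit + 1) i ∧ spfVal (1 + k) r = 0) := by
              rintro ⟨hm, hz⟩
              obtain ⟨ha, hb, hc⟩ := hmem.mp hm
              have hle2 : r.minFac ≤ 2 + k := Nat.minFac_le_of_dvd (by omega) hc
              have hgt1 : ¬ (r.minFac ≤ 1 + k) := by
                intro hle13
                unfold spfVal at hz
                rw [if_pos ⟨h2r, hle13⟩] at hz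
                have : r.minFac = 0 := by exact_mod_cast hz
                omega
              omega
            rw [if_neg hcond]
            unfold spfVal
            by_cases hc13 : r.minFac ≤ 1 + k
            · rw [if_pos ⟨h2r, hc13⟩, if_pos ⟨h2r, by omega⟩]
            · rw [if_neg (by tauto), if_neg (by rintro ⟨_, hcc⟩; omega)]
        · have hnm : ¬ ((r : Int) ∈ PySem.List.pyRange i (limit + 1) i) := by
            intro hm
            obtain ⟨ha, _, _⟩ := hmem.mp hm
            omega
          rw [if_neg (by tauto)]
          unfold spfVal
          rw [if_neg (by tauto), if_neg (by tauto)]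
  have hfin : (2 + ((limit - 1).toNat : Int)) = limit + 1 := by omega
  obtain ⟨_, hget⟩ := main (limit - 1).toNat (by omega)
  rw [hfin] at hget
  have := hget q hq
  unfold pvASieve
  rw [this, show 1 + (limit - 1).toNat = limit.toNat by omega]

lemma pvASieve_spf (limit : Int) (hl : 1 ≤ limit) (n : Int)
    (hn : n ∈ PySem.List.pyRange 2 (limit + 1) 1) :
    PySem.List.pyGetD (pvASieve limit) n 0 = (n.toNat.minFac : Int) := by
  rw [PySem.List.mem_pyRange_one] at hn
  rw [PySem.List.pyGetD_of_nonneg _ 0 (by omega), pvASieve_getD limit hl n.toNat (by omega)]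
  unfold spfVal
  rw [if_pos ⟨by omega, le_trans (Nat.minFac_le (by omega)) (by omega)⟩]

-- the common mu step (p = smallest prime factor of n), in A's shape and in B's shape
def muStepA (mu : List Int) (n : Int) : List Int :=
  let p : Int := (n.toNat.minFac : Nat)
  if PySem.Int.mod (PySem.Int.floordiv n p) p == 0 then mu.set n.toNat 0
  else mu.set n.toNat (-(PySem.List.pyGetD mu (PySem.Int.floordiv n p) 0))

def muStepB (mu : List Int) (n : Int) : List Int :=
  let p : Int := (n.toNat.minFac : Nat)
  mu ++ [if PySem.Int.mod (PySem.Int.floordiv n p) p == 0 then 0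
         else -(PySem.List.pyGetD mu (PySem.Int.floordiv n p) 0)]

lemma mu_fold_rel (limit : Int) (hl : 1 ≤ limit) :
    ∀ k : Nat, (k : Int) ≤ limit - 1 →
      ((PySem.List.pyRange 2 (2 + (k : Int)) 1).foldl muStepB [0, 1]).length = 2 + k ∧
      (PySem.List.pyRange 2 (2 + (k : Int)) 1).foldl muStepA
          ((List.replicate (limit + 1).toNat 0).set 1 1)
        = (PySem.List.pyRange 2 (2 + (k : Int)) 1).foldl muStepB [0, 1]
          ++ List.replicate (limit.toNat - 1 - k) 0 := by
  intro k
  induction k with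
  | zero =>
    intro _
    rw [show (2 + ((0 : Nat) : Int)) = 2 by norm_num, PySem.List.pyRange_one_eq_nil le_rfl]
    simp only [List.foldl_nil]
    refine ⟨by simp, ?_⟩
    have h1 : (limit + 1).toNat = (limit.toNat - 1) + 2 := by omega
    rw [h1]
    rw [show (limit.toNat - 1) + 2 = ((limit.toNat - 1) + 1) + 1 by omega]
    rw [List.replicate_succ, List.replicate_succ, List.set_cons_succ, List.set_cons_zero]
    simp
  | succ k ih =>
    intro hk
    obtain ⟨ihlen, iheq⟩ := ih (by push_cast at hk ⊢; omega)
    have hsplit : PySem.List.pyRange 2 (2 + ((k + 1 : Nat) : Int)) 1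
        = PySem.List.pyRange 2 (2 + (k : Int)) 1 ++ [2 + (k : Int)] := by
      rw [show (2 + ((k + 1 : Nat) : Int)) = (2 + (k : Int)) + 1 by push_cast; ring]
      exact PySem.List.pyRange_one_succ_right (by omega)
    rw [hsplit, List.foldl_append, List.foldl_append, List.foldl_cons, List.foldl_cons,
        List.foldl_nil, List.foldl_nil]
    set B := (PySem.List.pyRange 2 (2 + (k : Int)) 1).foldl muStepB [0, 1] with hB
    set n : Int := 2 + (k : Int) with hn
    have hnN : n.toNat = 2 + k := by omega
    have hnL : 2 + k ≤ limit.toNat := by omega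
    -- the read index q = n // p is < length of B and nonnegative
    have hp2 : 2 ≤ (2 + k).minFac := minFac_two_le (by omega)
    have hple : (2 + k).minFac ≤ 2 + k := Nat.minFac_le (by omega)
    have hpcast : ((n.toNat.minFac : Nat) : Int) = (((2 + k).minFac : Nat) : Int) := by rw [hnN]
    have hq : PySem.Int.floordiv n ((n.toNat.minFac : Nat) : Int)
        = (((2 + k) / (2 + k).minFac : Nat) : Int) := by
      rw [hpcast, show n = (((2 + k : Nat) : Nat) : Int) by push_cast; omega]
      exact PySem.Int.floordiv_natCast _ _
    have hqlt : (2 + k) / (2 + k).minFac < 2 + k := Nat.div_lt_self (by omega) (by omega)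
    -- reading mu[q] gives the same value in A's padded list and in B's list
    have hread : PySem.List.pyGetD (B ++ List.replicate (limit.toNat - 1 - k) 0)
        (PySem.Int.floordiv n ((n.toNat.minFac : Nat) : Int)) 0
        = PySem.List.pyGetD B (PySem.Int.floordiv n ((n.toNat.minFac : Nat) : Int)) 0 := by
      rw [hq, PySem.List.pyGetD_of_nonneg _ 0 (by positivity),
          PySem.List.pyGetD_of_nonneg _ 0 (by positivity)]
      rw [Int.toNat_natCast]
      exact List.getD_append _ _ _ _ (by rw [ihlen]; omega)
    -- setting at index n.toNat = B.length splits off the head of the zero padding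
    have hpad : limit.toNat - 1 - k = (limit.toNat - 1 - (k + 1)) + 1 := by omega
    have hset : ∀ v : Int, (B ++ List.replicate (limit.toNat - 1 - k) 0).set n.toNat v
        = (B ++ [v]) ++ List.replicate (limit.toNat - 1 - (k + 1)) 0 := by
      intro v
      rw [List.set_append, if_neg (by rw [ihlen, hnN]; omega)]
      rw [ihlen, hnN, Nat.sub_self, hpad, List.replicate_succ, List.set_cons_zero]
      simp
    constructor
    · rw [muStepB]
      simp only [List.length_append, List.length_cons, List.length_nil, ihlen]
      omega
    · rw [iheq, muStepA, muStepB]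
      by_cases hc : (PySem.Int.mod (PySem.Int.floordiv n ((n.toNat.minFac : Nat) : Int))
          ((n.toNat.minFac : Nat) : Int) == 0) = true
      · rw [if_pos hc, if_pos hc, hset]
      · rw [if_neg hc, if_neg hc, hset, hread]

def MStepA (mu : List Int) (acc : List Int × Int) (n : Int) : List Int × Int :=
  let s := acc.2 + PySem.List.pyGetD mu n 0
  (acc.1.set n.toNat s, s)

def MStepB (acc : List Int × Int) (v : Int) : List Int × Int :=
  (acc.1 ++ [acc.2 + v], acc.2 + v)

lemma M_fold_rel (limit : Int) (hl : 1 ≤ limit) (mu : List Int)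
    (hmu : mu.length = limit.toNat + 1) :
    ∀ k : Nat, k ≤ limit.toNat →
      (((mu.drop 1).take k).foldl MStepB ([0], 0)).1.length = k + 1 ∧
      (((mu.drop 1).take k).foldl MStepB ([0], 0)).2
        = ((PySem.List.pyRange 1 (1 + (k : Int)) 1).foldl (MStepA mu)
            (List.replicate (limit + 1).toNat 0, 0)).2 ∧
      ((PySem.List.pyRange 1 (1 + (k : Int)) 1).foldl (MStepA mu)
          (List.replicate (limit + 1).toNat 0, 0)).1
        = (((mu.drop 1).take k).foldl MStepB ([0], 0)).1
          ++ List.replicate (limit.toNat - k) 0 := by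
  intro k
  induction k with
  | zero =>
    intro _
    rw [show (1 + ((0 : Nat) : Int)) = 1 by norm_num, PySem.List.pyRange_one_eq_nil le_rfl]
    simp only [List.take_zero, List.foldl_nil]
    refine ⟨by simp, by simp, ?_⟩
    rw [show (limit + 1).toNat = (limit.toNat - 0) + 1 by omega]
    rw [List.replicate_succ]
    simp
  | succ k ih =>
    intro hk
    obtain ⟨ihlen, ihs, iheq⟩ := ih (by omega)
    have hdlen : (mu.drop 1).length = limit.toNat := by simp [hmu]
    have hsplitB : (mu.drop 1).take (k + 1) = (mu.drop 1).take k ++ [mu[1 + k]'(by omega)] := by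
      rw [← List.take_concat_get (by omega : k < (mu.drop 1).length)]
      have h1k : 1 + k = k + 1 := by omega
      simp [h1k]
    have hsplitA : PySem.List.pyRange 1 (1 + ((k + 1 : Nat) : Int)) 1
        = PySem.List.pyRange 1 (1 + (k : Int)) 1 ++ [1 + (k : Int)] := by
      rw [show (1 + ((k + 1 : Nat) : Int)) = (1 + (k : Int)) + 1 by push_cast; ring]
      exact PySem.List.pyRange_one_succ_right (by omega)
    rw [hsplitA, hsplitB, List.foldl_append, List.foldl_append, List.foldl_cons, List.foldl_cons,
        List.foldl_nil, List.foldl_nil]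
    set accB := ((mu.drop 1).take k).foldl MStepB ([0], 0) with hAccB
    set accA := (PySem.List.pyRange 1 (1 + (k : Int)) 1).foldl (MStepA mu)
      (List.replicate (limit + 1).toNat 0, 0) with hAccA
    have hn : (1 + (k : Int)).toNat = 1 + k := by omega
    have hval : PySem.List.pyGetD mu (1 + (k : Int)) 0 = mu[1 + k]'(by omega) := by
      rw [PySem.List.pyGetD_of_nonneg _ 0 (by omega), hn]
      exact List.getD_eq_getElem mu 0 (by omega)
    have hset : accA.1.set (1 + (k : Int)).toNat (accB.2 + mu[1 + k]'(by omega))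
        = (accB.1 ++ [accB.2 + mu[1 + k]'(by omega)]) ++ List.replicate (limit.toNat - (k + 1)) 0 := by
      rw [iheq, hn, List.set_append, if_neg (by rw [ihlen]; omega), ihlen]
      rw [show 1 + k - (k + 1) = 0 from by omega]
      rw [show limit.toNat - k = (limit.toNat - (k + 1)) + 1 by omega, List.replicate_succ,
          List.set_cons_zero]
      simp
    refine ⟨?_, ?_, ?_⟩
    · rw [MStepB]; simp [ihlen]
    · rw [MStepB, MStepA]
      simp only [hval, ihs]
    · rw [MStepB, MStepA]
      simp only [hval, ← ihs]
      exact hset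

-- ===== VERDICT (by name: the statement is the Claim_ definition above) =====
theorem mertens_sieve_spec : Claim_equal_mertens_sieve := by
  intro limit _ hpre
  have hl : 1 ≤ limit := hpre
  unfold Spec_mertens_sieve
  simp only [mertens_sieve, mertens_sieve_alt]
  -- both mu loops compute with p = minFac n
  have hA : (PySem.List.pyRange 2 (limit + 1) 1).foldl (fun mu n =>
      let p := PySem.List.pyGetD (pvASieve limit) n 0
      if PySem.Int.mod (PySem.Int.floordiv n p) p == 0 then mu.set n.toNat 0
      else mu.set n.toNat (-(PySem.List.pyGetD mu (PySem.Int.floordiv n p) 0)))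
      ((List.replicate (limit + 1).toNat 0).set 1 1)
      = (PySem.List.pyRange 2 (limit + 1) 1).foldl muStepA
        ((List.replicate (limit + 1).toNat 0).set 1 1) := by
    refine PySem.List.foldl_congr_mem _ _ _ _ ?_
    intro acc n hn
    simp only [pvASieve_spf limit hl n hn, muStepA]
  have hB : (PySem.List.pyRange 2 (limit + 1) 1).foldl (fun mu n =>
      let p : Int := (smallestFactor n.toNat : Nat)
      let q := PySem.Int.floordiv n p
      mu ++ [if PySem.Int.mod q p == 0 then 0 else -(PySem.List.pyGetD mu q 0)]) [0, 1]
      = (PySem.List.pyRange 2 (limit + 1) 1).foldl muStepB [0, 1] := by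
    refine PySem.List.foldl_congr_mem _ _ _ _ ?_
    intro acc n hn
    rw [PySem.List.mem_pyRange_one] at hn
    simp only [smallestFactor_eq_minFac n.toNat (by omega), muStepB]
  rw [hA, hB]
  -- the two mu lists are equal
  have hk := mu_fold_rel limit hl (limit - 1).toNat (by omega)
  rw [show (2 + (((limit - 1).toNat : Nat) : Int)) = limit + 1 by omega] at hk
  obtain ⟨hBlen, hABeq⟩ := hk
  rw [show limit.toNat - 1 - (limit - 1).toNat = 0 from by omega, List.replicate_zero,
      List.append_nil] at hABeq
  rw [hABeq]
  set mu := (PySem.List.pyRange 2 (limit + 1) 1).foldl muStepB [0, 1] with hmudef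
  have hmulen : mu.length = limit.toNat + 1 := by rw [hBlen]; omega
  -- the two M loops
  rw [PySem.List.slice_from mu (by norm_num : (0 : Int) ≤ 1)]
  rw [show ((1 : Int).toNat) = 1 from rfl]
  have hMA : (fun (acc : List Int × Int) (n : Int) =>
      let s := acc.2 + PySem.List.pyGetD mu n 0
      (acc.1.set n.toNat s, s)) = MStepA mu := rfl
  have hMB : (fun (acc : List Int × Int) (v : Int) =>
      (acc.1 ++ [acc.2 + v], acc.2 + v)) = MStepB := rfl
  rw [hMA, hMB]
  obtain ⟨_, _, hM⟩ := M_fold_rel limit hl mu hmulen limit.toNat le_rfl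
  rw [List.take_of_length_le (by simp [hmulen])] at hM
  rw [show (1 + ((limit.toNat : Nat) : Int)) = limit + 1 by omega] at hM
  rw [show limit.toNat - limit.toNat = 0 from by omega, List.replicate_zero,
      List.append_nil] at hM
  rw [hM]
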